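-- pv_equiv track=rewrite | github.com/ShivajiRam108/Leetcode-Problems | GFG/Sum of Digit is Palindrome or not.py | isDigitSumPalindrome
-- ===== SOURCE A (Python) =====
-- def isDigitSumPalindrome(n):
--     res = 0
--     for i in str(n):
--         res = int(i) + res
--     x = ''
--     for i in str(res):
--         x = i + x
--     if str(res) == x:
--         return True
--     else:
--         return False
-- ===== SOURCE B (Python) =====
-- def isDigitSumPalindrome(n):
--     # digit sum via str(n), like the original (so n<0 still raises ValueError);
--     # palindrome check done arithmetically instead of by string reversal
--     res = 0
--     for i in str(n):
--         res = int(i) + res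
--     rev, t = 0, res
--     while t > 0:
--         rev = rev * 10 + t % 10
--         t //= 10
--     return res == rev
-- ===== Notes on version B (the rewrite author's own statement) =====
-- stated objective: alternative
-- what changed: The palindrome test on the digit sum is done by arithmetic digit reversal (rev=rev*10+t%10; t//=10) and an integer comparison instead of building the reversed string and comparing strings.
import Mathlib
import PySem

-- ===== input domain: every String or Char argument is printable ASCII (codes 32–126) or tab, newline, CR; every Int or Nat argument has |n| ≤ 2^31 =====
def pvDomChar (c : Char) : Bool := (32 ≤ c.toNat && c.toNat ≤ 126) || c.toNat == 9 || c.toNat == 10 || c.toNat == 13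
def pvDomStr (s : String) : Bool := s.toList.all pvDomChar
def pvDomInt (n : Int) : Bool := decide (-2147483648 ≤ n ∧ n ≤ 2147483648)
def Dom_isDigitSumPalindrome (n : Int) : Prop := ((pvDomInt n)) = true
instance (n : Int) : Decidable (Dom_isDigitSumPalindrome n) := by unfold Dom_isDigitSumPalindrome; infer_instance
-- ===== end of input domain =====

-- B replaces A's string-reversal palindrome test on the digit sum by arithmetic digit
-- reversal and an integer comparison (alternative decomposition; same cost).

-- ===== PORT A =====
-- int(i) on a single character: exact via PySem.Int.ofChars?; Pre_ (0 ≤ n) excludes the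
-- '-' character on which Python raises ValueError, so the .getD 0 default is never taken
-- inside Pre_.
def isDigitSumPalindrome (n : Int) : Bool :=
  let res := (PySem.Int.toChars n).foldl (fun res i => (PySem.Int.ofChars? [i]).getD 0 + res) 0
  let x := (PySem.Int.toChars res).foldl (fun x i => [i] ++ x) ([] : List Char)
  PySem.Int.toChars res == x

-- ===== PORT B =====
-- while t > 0: rev = rev*10 + t%10; t //= 10 — ported with a fuel counter t.toNat + 1,
-- which strictly dominates the number of iterations (t shrinks by /10 each step).
def pvRevLoop : Nat → Int → Int → Int
  | 0, _, rev => rev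
  | fuel + 1, t, rev =>
    if t > 0 then pvRevLoop fuel (PySem.Int.floordiv t 10) (rev * 10 + PySem.Int.mod t 10)
    else rev

def isDigitSumPalindrome_alt (n : Int) : Bool :=
  let res := (PySem.Int.toChars n).foldl (fun res i => (PySem.Int.ofChars? [i]).getD 0 + res) 0
  res == pvRevLoop (res.toNat + 1) res 0

-- ===== PRECONDITION & SPEC =====
-- Pre_ excludes n < 0, on which Python's int('-') raises ValueError in both A and B.
def Pre_isDigitSumPalindrome (n : Int) : Prop := 0 ≤ n
instance (n : Int) : Decidable (Pre_isDigitSumPalindrome n) := by unfold Pre_isDigitSumPalindrome; infer_instance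
def pvWitness_isDigitSumPalindrome : Int := (46)

def Spec_isDigitSumPalindrome (n : Int) (out : Bool) : Prop := out = isDigitSumPalindrome_alt n
instance (n : Int) (out : Bool) : Decidable (Spec_isDigitSumPalindrome n out) := by unfold Spec_isDigitSumPalindrome; infer_instance

-- ===== CLAIM (what is proved, stated in full; the proofs are below) =====
def Claim_equal_isDigitSumPalindrome : Prop := ∀ (n : Int), Dom_isDigitSumPalindrome n → Pre_isDigitSumPalindrome n → Spec_isDigitSumPalindrome n (isDigitSumPalindrome n)

-- ===== LEMMAS AND PROOFS =====

-- every character produced by Nat.toDigits 10 is a digit character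
lemma pv_toDigitsCore_chars (f : Nat) : ∀ (m : Nat) (l : List Char) (c : Char),
    c ∈ Nat.toDigitsCore 10 f m l → c ∈ l ∨ ∃ d : Nat, d < 10 ∧ c = Nat.digitChar d := by
  induction f with
  | zero => intro m l c h; exact Or.inl h
  | succ f ih =>
    intro m l c h
    simp only [Nat.toDigitsCore] at h
    by_cases hm : m / 10 = 0
    · rw [if_pos hm] at h
      rcases List.mem_cons.mp h with h | h
      · exact Or.inr ⟨m % 10, Nat.mod_lt _ (by norm_num), h⟩
      · exact Or.inl h
    · rw [if_neg hm] at h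
      rcases ih (m / 10) (Nat.digitChar (m % 10) :: l) c h with h' | h'
      · rcases List.mem_cons.mp h' with h' | h'
        · exact Or.inr ⟨m % 10, Nat.mod_lt _ (by norm_num), h'⟩
        · exact Or.inl h'
      · exact Or.inr h'

lemma pv_toDigits_chars (m : Nat) (c : Char) (hc : c ∈ Nat.toDigits 10 m) :
    ∃ d : Nat, d < 10 ∧ c = Nat.digitChar d := by
  rcases pv_toDigitsCore_chars (m + 1) m [] c hc with h | h
  · cases h
  · exact h

-- int(str-digit) value: for d < 10, converting the digit char back gives d
lemma pv_ofChars_digitChar (d : Nat) (hd : d < 10) :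
    (PySem.Int.ofChars? [Nat.digitChar d]).getD 0 = (d : Int) := by
  interval_cases d <;> decide

-- the digit-sum fold over a list of digit chars: bounds acc ≤ result ≤ acc + 9·len
lemma pv_sum_fold_bounds (L : List Char)
    (hL : ∀ c ∈ L, ∃ d : Nat, d < 10 ∧ c = Nat.digitChar d) :
    ∀ acc : Int, acc ≤ L.foldl (fun res i => (PySem.Int.ofChars? [i]).getD 0 + res) acc ∧
      L.foldl (fun res i => (PySem.Int.ofChars? [i]).getD 0 + res) acc ≤ acc + 9 * L.length := by
  induction L with
  | nil => intro acc; simp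
  | cons c t ih =>
    intro acc
    obtain ⟨d, hd, rfl⟩ := hL c (by simp)
    have h := ih (fun x hx => hL x (by simp [hx])) ((PySem.Int.ofChars? [Nat.digitChar d]).getD 0 + acc)
    rw [pv_ofChars_digitChar d hd] at h
    simp only [List.foldl_cons, pv_ofChars_digitChar d hd, List.length_cons]
    constructor
    · have : (0 : Int) ≤ d := Int.natCast_nonneg d
      omega
    · have : (d : Int) ≤ 9 := by exact_mod_cast Nat.lt_succ_iff.mp hd
      omega

-- the palindrome checks agree on every possible digit sum 0..90 (kernel evaluation)
lemma pv_check_agree : ∀ k : Fin 91,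
    ((PySem.Int.toChars (k : Int) ==
        (PySem.Int.toChars (k : Int)).foldl (fun x i => [i] ++ x) ([] : List Char)) =
      ((k : Int) == pvRevLoop ((k : Int).toNat + 1) (k : Int) 0)) := by decide

-- ===== VERDICT (by name: the statement is the Claim_ definition above) =====
theorem isDigitSumPalindrome_spec : Claim_equal_isDigitSumPalindrome := by
  intro n hdom hpre
  unfold Pre_isDigitSumPalindrome at hpre
  unfold Spec_isDigitSumPalindrome isDigitSumPalindrome isDigitSumPalindrome_alt
  simp only []
  set L := PySem.Int.toChars n with hLdef
  have hchars : ∀ c ∈ L, ∃ d : Nat, d < 10 ∧ c = Nat.digitChar d := by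
    intro c hc
    apply pv_toDigits_chars n.toNat
    have : L = Nat.toDigits 10 n.toNat := by
      rw [hLdef]; unfold PySem.Int.toChars
      rw [if_neg (by omega)]
    rwa [this] at hc
  have hlen : L.length ≤ 10 := by
    have : L = Nat.toDigits 10 n.toNat := by
      rw [hLdef]; unfold PySem.Int.toChars; rw [if_neg (by omega)]
    rw [this]
    apply Nat.toDigits_length 10 n.toNat 10 (by norm_num)
    have hub : n ≤ 2147483648 := by
      have := hdom
      unfold Dom_isDigitSumPalindrome pvDomInt at this
      simp at this; omega
    have : n.toNat ≤ 2147483648 := by omega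
    calc n.toNat ≤ 2147483648 := this
      _ < 10 ^ 10 := by norm_num
  set res := L.foldl (fun res i => (PySem.Int.ofChars? [i]).getD 0 + res) 0 with hres
  have hb := pv_sum_fold_bounds L hchars 0
  rw [← hres] at hb
  have h0 : 0 ≤ res := hb.1
  have h90 : res ≤ 90 := by
    have : (L.length : Int) ≤ 10 := by exact_mod_cast hlen
    have := hb.2
    omega
  have : res = ((⟨res.toNat, by omega⟩ : Fin 91) : Int) := by simp; omega
  rw [this]
  exact pv_check_agree ⟨res.toNat, by omega⟩
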